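-- pv_equiv track=rewrite | github.com/brianfilliat/VSCode-Python-2026 | solvePeaksProblem.py | solvePeaksProblem
-- ===== SOURCE A (Python) =====
-- def solvePeaksProblem(arr):
--     n = len(arr)
--     if n < 3:
--         return 0
--     peaks = []
--     for i in range(1, n-1):
--         if arr[i-1] < arr[i] > arr[i+1]:
--             peaks.append(i)
--     if len(peaks) < 2:
--         return 0
--     max_dist = 0
--     for i in range(1, len(peaks)):
--         dist = peaks[i] - peaks[i-1]
--         if dist > max_dist:
--             max_dist = dist
--     return max_dist
-- ===== SOURCE B (Python) =====
-- def solvePeaksProblem(arr):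
--     last = -1
--     max_dist = 0
--     for i in range(1, len(arr) - 1):
--         if arr[i-1] < arr[i] > arr[i+1]:
--             if last >= 0 and i - last > max_dist:
--                 max_dist = i - last
--             last = i
--     return max_dist
-- ===== Notes on version B (the rewrite author's own statement) =====
-- stated objective: simpler
-- what changed: B fuses A's two passes into one: instead of materializing a peaks list and re-scanning it by index for the max gap, B keeps only the last peak index and the running max gap in a single pass.
import Mathlib
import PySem

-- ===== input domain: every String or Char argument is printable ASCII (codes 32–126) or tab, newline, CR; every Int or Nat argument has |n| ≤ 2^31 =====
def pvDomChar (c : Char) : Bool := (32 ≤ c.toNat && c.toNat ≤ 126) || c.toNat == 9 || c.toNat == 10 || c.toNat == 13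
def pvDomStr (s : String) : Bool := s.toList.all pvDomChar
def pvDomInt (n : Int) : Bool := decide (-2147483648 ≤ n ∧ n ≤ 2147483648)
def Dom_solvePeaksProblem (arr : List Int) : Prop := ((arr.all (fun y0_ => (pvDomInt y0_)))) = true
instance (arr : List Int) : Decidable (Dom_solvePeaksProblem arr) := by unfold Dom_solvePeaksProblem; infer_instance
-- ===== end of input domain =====

-- B fuses A's two passes into one, tracking only the last peak index and the running max gap
-- instead of materializing the peaks list and re-scanning it (objective: simpler).

-- ===== PORT A =====
def solvePeaksProblem (arr : List Int) : Int :=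
  let n : Int := arr.length
  if n < 3 then 0
  else
    let peaks : List Int := (PySem.List.pyRange 1 (n - 1) 1).foldl
      (fun peaks i =>
        if PySem.List.pyGetD arr (i - 1) 0 < PySem.List.pyGetD arr i 0 ∧
           PySem.List.pyGetD arr i 0 > PySem.List.pyGetD arr (i + 1) 0
        then peaks ++ [i] else peaks) []
    if (peaks.length : Int) < 2 then 0
    else
      (PySem.List.pyRange 1 (peaks.length : Int) 1).foldl
        (fun max_dist i =>
          let dist := PySem.List.pyGetD peaks i 0 - PySem.List.pyGetD peaks (i - 1) 0
          if dist > max_dist then dist else max_dist) 0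

-- ===== PORT B =====
def solvePeaksProblem_alt (arr : List Int) : Int :=
  let st : Int × Int := (PySem.List.pyRange 1 ((arr.length : Int) - 1) 1).foldl
    (fun (st : Int × Int) i =>
      if PySem.List.pyGetD arr (i - 1) 0 < PySem.List.pyGetD arr i 0 ∧
         PySem.List.pyGetD arr i 0 > PySem.List.pyGetD arr (i + 1) 0
      then (i, if st.1 ≥ 0 ∧ i - st.1 > st.2 then i - st.1 else st.2)
      else st) (-1, 0)
  st.2

-- ===== PRECONDITION & SPEC =====
def Spec_solvePeaksProblem (arr : List Int) (out : Int) : Prop := out = solvePeaksProblem_alt arr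
instance (arr : List Int) (out : Int) : Decidable (Spec_solvePeaksProblem arr out) := by unfold Spec_solvePeaksProblem; infer_instance

-- ===== CLAIM (what is proved, stated in full; the proofs are below) =====
def Claim_equal_solvePeaksProblem : Prop := ∀ (arr : List Int), Dom_solvePeaksProblem arr → Spec_solvePeaksProblem arr (solvePeaksProblem arr)

-- ===== LEMMAS AND PROOFS =====

-- A's second loop, pairwise: running max of gaps between consecutive elements.
def pvGm (prev : Int) (l : List Int) (acc : Int) : Int :=
  match l with
  | [] => acc
  | y :: t => pvGm y t (if y - prev > acc then y - prev else acc)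

-- max gap of a peaks list (0 when fewer than two elements)
def pvG (p : List Int) : Int :=
  match p with
  | [] => 0
  | h :: t => pvGm h t 0

-- last element, -1 when empty (B's sentinel)
def pvLastV (p : List Int) : Int :=
  match p with
  | [] => -1
  | [x] => x
  | _ :: y :: t => pvLastV (y :: t)

theorem pvLastV_append_singleton (p : List Int) (i : Int) : pvLastV (p ++ [i]) = i := by
  induction p with
  | nil => rfl
  | cons h t ih =>
    cases t with
    | nil => rfl
    | cons y u => simpa using ih

theorem pvLastV_pos (p : List Int) (hp : ∀ x ∈ p, 1 ≤ x) (hne : p ≠ []) : 1 ≤ pvLastV p := by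
  induction p with
  | nil => exact absurd rfl hne
  | cons h t ih =>
    cases t with
    | nil => exact hp h (List.mem_cons_self)
    | cons y u =>
      exact ih (fun x hx => hp x (List.mem_cons_of_mem _ hx)) (by simp)

theorem pvLastV_cons_cons (a b : Int) (t : List Int) : pvLastV (a :: b :: t) = pvLastV (b :: t) := rfl

theorem pvGm_append (t : List Int) (h i acc : Int) :
    pvGm h (t ++ [i]) acc =
      (if i - pvLastV (h :: t) > pvGm h t acc then i - pvLastV (h :: t) else pvGm h t acc) := by
  induction t generalizing h acc with
  | nil => simp [pvGm, pvLastV]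
  | cons y t ih =>
    simp only [List.cons_append, pvGm, pvLastV_cons_cons]
    exact ih y _

-- pairwise fold over (tail zip self) computes pvGm
theorem pvZip_foldl (t : List Int) (h acc : Int) :
    (t.zip (h :: t)).foldl (fun md (ab : Int × Int) => if ab.1 - ab.2 > md then ab.1 - ab.2 else md) acc
      = pvGm h t acc := by
  induction t generalizing h acc with
  | nil => simp [pvGm]
  | cons y t ih => simp [pvGm, ih y]

-- A's index-based second loop equals the pairwise fold
theorem pvSecondLoop_eq (p : List Int) :
    (PySem.List.pyRange 1 (p.length : Int) 1).foldl
      (fun max_dist i =>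
        let dist := PySem.List.pyGetD p i 0 - PySem.List.pyGetD p (i - 1) 0
        if dist > max_dist then dist else max_dist) 0 = pvG p := by
  cases p with
  | nil => simp [PySem.List.pyRange_one_eq_nil, pvG]
  | cons h t =>
    have hmap : (PySem.List.pyRange 1 ((h :: t).length : Int) 1).map
        (fun i => ((PySem.List.pyGetD (h :: t) i 0), (PySem.List.pyGetD (h :: t) (i - 1) 0)))
        = t.zip (h :: t) := by
      apply List.ext_getElem
      · simp only [List.length_map, List.length_zip, PySem.List.length_pyRange_one,
          List.length_cons]
        omega
      · intro k hk1 hk2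
        have hk : k < t.length := by
          have := hk1; simp [PySem.List.length_pyRange_one] at this; omega
        have hkr : k < (PySem.List.pyRange 1 ((h :: t).length : Int) 1).length := by
          simpa using hk1
        have hidx : (PySem.List.pyRange 1 ((h :: t).length : Int) 1)[k]'hkr = 1 + k :=
          PySem.List.getElem_pyRange_one 1 ((h :: t).length : Int) k hkr
        have e1 : ((1 : Int) + (k : Int)).toNat = k + 1 := by omega
        simp only [List.getElem_map, hidx]
        rw [PySem.List.pyGetD_eq_getElem (h :: t) 0 (by omega) (by simp; omega),
            PySem.List.pyGetD_eq_getElem (h :: t) 0 (by omega) (by simp; omega)]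
        simp [e1]
    calc (PySem.List.pyRange 1 ((h :: t).length : Int) 1).foldl
          (fun max_dist i =>
            let dist := PySem.List.pyGetD (h :: t) i 0 - PySem.List.pyGetD (h :: t) (i - 1) 0
            if dist > max_dist then dist else max_dist) 0
        = ((PySem.List.pyRange 1 ((h :: t).length : Int) 1).map
            (fun i => ((PySem.List.pyGetD (h :: t) i 0), (PySem.List.pyGetD (h :: t) (i - 1) 0)))).foldl
            (fun md (ab : Int × Int) => if ab.1 - ab.2 > md then ab.1 - ab.2 else md) 0 := by
          rw [List.foldl_map]
      _ = (t.zip (h :: t)).foldl (fun md (ab : Int × Int) => if ab.1 - ab.2 > md then ab.1 - ab.2 else md) 0 := by rw [hmap]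
      _ = pvG (h :: t) := pvZip_foldl t h 0

-- fused single pass simulates (last, max-gap) of the peaks prefix, for any peak predicate
theorem pvFuse (c : Int → Prop) [DecidablePred c] (l : List Int) :
    ∀ (p : List Int), (∀ x ∈ p, 1 ≤ x) → (∀ i ∈ l, 1 ≤ i) →
    l.foldl (fun (st : Int × Int) i =>
        if c i then (i, if st.1 ≥ 0 ∧ i - st.1 > st.2 then i - st.1 else st.2) else st)
      (pvLastV p, pvG p)
    = (pvLastV (l.foldl (fun peaks i => if c i then peaks ++ [i] else peaks) p),
       pvG (l.foldl (fun peaks i => if c i then peaks ++ [i] else peaks) p)) := by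
  induction l with
  | nil => intro p _ _; simp
  | cons i l ih =>
    intro p hp hl
    have hi : 1 ≤ i := hl i List.mem_cons_self
    simp only [List.foldl_cons]
    by_cases hc : c i
    · have hstep : ((i : Int), if pvLastV p ≥ 0 ∧ i - pvLastV p > pvG p then i - pvLastV p else pvG p)
          = (pvLastV (p ++ [i]), pvG (p ++ [i])) := by
        rw [pvLastV_append_singleton]
        cases p with
        | nil =>
          rw [if_neg (by simp [pvLastV])]
          simp [pvG, pvGm]
        | cons h t =>
          have hge : pvLastV (h :: t) ≥ 0 := by
            have := pvLastV_pos (h :: t) hp (by simp)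
            omega
          show _ = (i, pvG ((h :: t) ++ [i]))
          have : pvG ((h :: t) ++ [i]) = pvGm h (t ++ [i]) 0 := rfl
          rw [this, pvGm_append]
          simp [pvG, hge]
      rw [if_pos hc, if_pos hc, hstep]
      exact ih (p ++ [i])
        (by intro x hx
            rcases List.mem_append.mp hx with h' | h'
            · exact hp x h'
            · simp at h'; omega)
        (fun j hj => hl j (List.mem_cons_of_mem _ hj))
    · rw [if_neg hc, if_neg hc]
      exact ih p hp (fun j hj => hl j (List.mem_cons_of_mem _ hj))

-- pvG is 0 on lists of fewer than two elements
theorem pvG_short (p : List Int) (h : p.length < 2) : pvG p = 0 := by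
  match p, h with
  | [], _ => rfl
  | [x], _ => rfl

-- ===== VERDICT (by name: the statement is the Claim_ definition above) =====
theorem solvePeaksProblem_spec : Claim_equal_solvePeaksProblem := by
  intro arr _
  unfold Spec_solvePeaksProblem solvePeaksProblem solvePeaksProblem_alt
  by_cases hn : (arr.length : Int) < 3
  · rw [if_pos hn]
    have : PySem.List.pyRange 1 ((arr.length : Int) - 1) 1 = [] :=
      PySem.List.pyRange_one_eq_nil (by omega)
    simp [this]
  · rw [if_neg hn]
    have hfuse := pvFuse
      (fun i => PySem.List.pyGetD arr (i - 1) 0 < PySem.List.pyGetD arr i 0 ∧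
                PySem.List.pyGetD arr i 0 > PySem.List.pyGetD arr (i + 1) 0)
      (PySem.List.pyRange 1 ((arr.length : Int) - 1) 1) []
      (by intro x hx; simp at hx)
      (by intro i hi
          have := (PySem.List.mem_pyRange_one (a := 1) (b := (arr.length : Int) - 1)).mp hi
          omega)
    set peaks := (PySem.List.pyRange 1 ((arr.length : Int) - 1) 1).foldl
      (fun peaks i =>
        if PySem.List.pyGetD arr (i - 1) 0 < PySem.List.pyGetD arr i 0 ∧
           PySem.List.pyGetD arr i 0 > PySem.List.pyGetD arr (i + 1) 0
        then peaks ++ [i] else peaks) [] with hpeaks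
    have hB : ((PySem.List.pyRange 1 ((arr.length : Int) - 1) 1).foldl
        (fun (st : Int × Int) i =>
          if PySem.List.pyGetD arr (i - 1) 0 < PySem.List.pyGetD arr i 0 ∧
             PySem.List.pyGetD arr i 0 > PySem.List.pyGetD arr (i + 1) 0
          then (i, if st.1 ≥ 0 ∧ i - st.1 > st.2 then i - st.1 else st.2)
          else st) (-1, 0)).2 = pvG peaks := by
      rw [show ((-1 : Int), (0 : Int)) = (pvLastV [], pvG []) from rfl, hfuse]
    simp only [hB]
    by_cases hlen : (peaks.length : Int) < 2
    · rw [if_pos hlen, pvG_short peaks (by exact_mod_cast hlen)]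
    · rw [if_neg hlen, pvSecondLoop_eq]
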